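-- pv_equiv track=rewrite | github.com/OpenCPLC/Core | lib/pb/cbeauti.py | convert_block_comments
-- ===== SOURCE A (Python) =====
-- def convert_block_comments(code: str) -> str:
--   result = []
--   i = 0
--   in_string = False
--   string_char = None
--   while i < len(code):
--     if code[i] in '"\'':
--       if not in_string:
--         in_string = True
--         string_char = code[i]
--       elif code[i] == string_char and (i == 0 or code[i-1] != '\\'):
--         in_string = False
--       result.append(code[i])
--       i += 1
--       continue
--     if in_string:
--       result.append(code[i])
--       i += 1
--       continue
--     if code[i:i+2] == '/*':
--       end = code.find('*/', i+2)
--       if end == -1: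
--         result.append(code[i:])
--         break
--       comment_content = code[i+2:end]
--       if is_real_doxygen(code, i, comment_content):
--         result.append(code[i:end+2])
--         i = end + 2
--         continue
--       converted = convert_to_line_comments(comment_content, code, i, end)
--       if converted:
--         result.append(converted)
--       i = end + 2
--       continue
--     result.append(code[i])
--     i += 1
--   return ''.join(result)
--
-- def is_real_doxygen(code: str, pos: int, content: str) -> bool:
--   if code[pos:pos+3] == '/*!': return True
--   if code[pos:pos+3] == '/**':
--     if len(code) > pos+3 and code[pos+3] != '*':
--       if is_doxygen_content(content): return True
--   return False
--
-- def is_doxygen_content(content: str) -> bool: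
--   doxy_kw = ['@brief', '@param', '@return', '@note', '@warning', '@see',
--     '@file', '@def', '@enum', '@struct', '@typedef', '@var',
--     '\\brief', '\\param', '\\return', '\\note']
--   return any(kw in content for kw in doxy_kw)
--
-- def extract_comment_text(content: str) -> list:
--   lines = content.split('\n')
--   clean_lines = []
--   for line in lines:
--     clean = line.strip()
--     while clean.startswith('*'): clean = clean[1:].lstrip()
--     while clean.endswith('*'): clean = clean[:-1].rstrip()
--     clean = clean.strip('=-').strip()
--     if clean: clean_lines.append(clean)
--   return clean_lines
--
-- def convert_to_line_comments(content: str, full_code: str, start_pos: int, end_pos: int) -> str: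
--   line_start = full_code.rfind('\n', 0, start_pos) + 1
--   before_comment = full_code[line_start:start_pos]
--   code_before = before_comment.strip()
--   clean_lines = extract_comment_text(content)
--   if not clean_lines: return ''
--   if code_before:
--     return '  // ' + ' '.join(clean_lines)
--   if len(clean_lines) == 1: return '// ' + clean_lines[0]
--   next_line_start = full_code.find('\n', end_pos) + 1
--   indent_str = ''
--   if next_line_start > 0:
--     next_line_end = full_code.find('\n', next_line_start)
--     if next_line_end == -1: next_line_end = len(full_code)
--     next_line = full_code[next_line_start:next_line_end]
--     indent_str = ' ' * (len(next_line) - len(next_line.lstrip(' \t')))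
--   res = ['// ' + clean_lines[0]]
--   for clean in clean_lines[1:]:
--     res.append(indent_str + '// ' + clean)
--   return '\n'.join(res)
-- ===== SOURCE B (Python) =====
-- # Two-phase rewrite: phase 1 tokenizes the source into verbatim / comment spans,
-- # phase 2 renders each span; comment text is trimmed with index scans instead of
-- # repeated startswith/endswith loops, and multi-line output is one join with a
-- # composite separator.
--
-- _DOXY_KW = (r'@brief @param @return @note @warning @see @file @def @enum '
--             r'@struct @typedef @var \brief \param \return \note').split()
--
--
-- def _tokens(code):
--   """Spans ('v', i, j) emitted verbatim and ('c', i, e) block comments (e = index of '*/')."""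
--   toks = []
--   i, n = 0, len(code)
--   while i < n:
--     q = code[i]
--     if q == '"' or q == "'":
--       j = i + 1
--       while j < n and not (code[j] == q and code[j - 1] != '\\'):
--         j += 1
--       j = min(j + 1, n)
--       toks.append(('v', i, j))
--     elif code.startswith('/*', i):
--       e = code.find('*/', i + 2)
--       if e == -1:
--         toks.append(('v', i, n))
--         break
--       toks.append(('c', i, e))
--       j = e + 2
--     else:
--       j = i + 1
--       while j < n and code[j] != '"' and code[j] != "'" and not code.startswith('/*', j):
--         j += 1
--       toks.append(('v', i, j))
--     i = j
--   return toks
--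
--
-- def _clean(line):
--   s = line.strip()
--   a, b = 0, len(s)
--   while a < b and (s[a] == '*' or s[a].isspace()):
--     a += 1
--   while b > a and (s[b - 1] == '*' or s[b - 1].isspace()):
--     b -= 1
--   return s[a:b].strip('=-').strip()
--
--
-- def _emit(code, s, e):
--   content = code[s + 2:e]
--   h = code[s + 2:s + 4]
--   if h[:1] == '!' or (h[:1] == '*' and len(h) == 2 and h[1] != '*'
--                       and any(k in content for k in _DOXY_KW)):
--     return code[s:e + 2]
--   clean = [t for t in (_clean(l) for l in content.split('\n')) if t]
--   if not clean:
--     return ''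
--   ls = code.rfind('\n', 0, s) + 1
--   if code[ls:s].strip():
--     return '  // ' + ' '.join(clean)
--   if len(clean) == 1:
--     return '// ' + clean[0]
--   nl = code.find('\n', e) + 1
--   pad = ''
--   if nl > 0:
--     k = nl
--     while k < len(code) and code[k] in ' \t':
--       k += 1
--     pad = ' ' * (k - nl)
--   return '// ' + ('\n' + pad + '// ').join(clean)
--
--
-- def convert_block_comments(code: str) -> str:
--   return ''.join(_emit(code, i, j) if k == 'c' else code[i:j]
--                  for k, i, j in _tokens(code))
-- ===== Notes on version B (the rewrite author's own statement) =====
-- stated objective: alternative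
-- what changed: Split A's single per-character while-loop with cross-iteration in_string/string_char state into two staged passes: a tokenizer that returns a list of (kind, start, end) spans (whole string literals and plain runs found by inner index scans, so no in_string flag exists) and a renderer that maps each span to its output text; …
import Mathlib
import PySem

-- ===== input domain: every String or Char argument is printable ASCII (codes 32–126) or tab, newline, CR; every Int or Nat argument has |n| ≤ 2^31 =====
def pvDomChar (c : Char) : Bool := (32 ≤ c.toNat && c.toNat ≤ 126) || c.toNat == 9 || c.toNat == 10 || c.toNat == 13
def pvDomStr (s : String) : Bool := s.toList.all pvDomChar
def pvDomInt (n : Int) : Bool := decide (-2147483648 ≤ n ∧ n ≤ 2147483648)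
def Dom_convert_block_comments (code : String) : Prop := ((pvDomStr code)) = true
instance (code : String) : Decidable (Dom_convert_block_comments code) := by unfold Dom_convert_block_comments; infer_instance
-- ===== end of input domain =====

-- B replaces A's single per-character state-machine loop by two staged passes — a span
-- tokenizer and a renderer — with index scans instead of A's startswith/endswith strip loops
-- (a different decomposition of the same O(n) job; no speed claim).

-- ===== PORT A =====

-- doxy_kw list of Source A's is_doxygen_content
def doxyKws : List (List Char) :=
  ["@brief".toList, "@param".toList, "@return".toList, "@note".toList, "@warning".toList,
   "@see".toList, "@file".toList, "@def".toList, "@enum".toList, "@struct".toList,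
   "@typedef".toList, "@var".toList, "\\brief".toList, "\\param".toList, "\\return".toList,
   "\\note".toList]

-- any(kw in content for kw in doxy_kw)
def isDoxygenContent (content : List Char) : Bool :=
  doxyKws.any (fun kw => PySem.Chars.isIn kw content)

-- length facts needed by the termination proofs of the strip-stars loops
theorem lstrip_length_le (s : List Char) : (PySem.Chars.lstrip s).length ≤ s.length := by
  simp [PySem.Chars.lstrip]; exact List.length_dropWhile_le _ _
theorem rstrip_length_le (s : List Char) : (PySem.Chars.rstrip s).length ≤ s.length := by
  simp [PySem.Chars.rstrip]
  calc (List.dropWhile PySem.Chars.isspace s.reverse).length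
      ≤ s.reverse.length := List.length_dropWhile_le _ _
    _ = s.length := List.length_reverse

-- while clean.startswith('*'): clean = clean[1:].lstrip()
def stripStarsL (s : List Char) : List Char :=
  if h : PySem.Chars.startswith s ['*'] then
    stripStarsL (PySem.Chars.lstrip (PySem.List.slice s (some 1) none))
  else s
termination_by s.length
decreasing_by
  rcases s with _ | ⟨c, t⟩
  · simp [PySem.Chars.startswith] at h
  · have h1 : PySem.List.slice (c :: t) (some 1) none = t := by
      rw [PySem.List.slice_from _ (by norm_num)]; rfl
    rw [h1]
    have := lstrip_length_le t
    simp; omega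

-- while clean.endswith('*'): clean = clean[:-1].rstrip()
def stripStarsR (s : List Char) : List Char :=
  if h : PySem.Chars.endswith s ['*'] then
    stripStarsR (PySem.Chars.rstrip (PySem.List.slice s none (some (-1))))
  else s
termination_by s.length
decreasing_by
  have hne : s ≠ [] := by
    intro hs; subst hs; simp [PySem.Chars.endswith] at h
  have h1 : PySem.List.slice s none (some (-1)) = s.dropLast := by
    simp [pysem]
  rw [h1]
  have := rstrip_length_le s.dropLast
  have : s.dropLast.length < s.length := by
    rcases s with _ | ⟨c, t⟩
    · exact absurd rfl hne
    · simp
  omega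

-- line.strip(); star loops; .strip('=-').strip()
def cleanLine (line : List Char) : List Char :=
  PySem.Chars.strip
    (PySem.Chars.stripChars (stripStarsR (stripStarsL (PySem.Chars.strip line))) ['=', '-'])

-- is_real_doxygen
def isRealDoxygen (cs : List Char) (pos : Nat) (content : List Char) : Bool :=
  if PySem.List.slice cs (some (pos : Int)) (some ((pos : Int) + 3)) = "/*!".toList then true
  else if PySem.List.slice cs (some (pos : Int)) (some ((pos : Int) + 3)) = "/**".toList then
    if cs.length > pos + 3 ∧ PySem.List.pyGet? cs ((pos : Int) + 3) ≠ some '*' then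
      if isDoxygenContent content then true else false
    else false
  else false

-- extract_comment_text: loop appending the truthy cleaned lines
def extractCommentText (content : List Char) : List (List Char) :=
  (PySem.Chars.splitOn content ['\n']).foldl
    (fun acc line =>
      let clean := cleanLine line
      if clean.isEmpty = false then acc ++ [clean] else acc) []

-- convert_to_line_comments
def convertToLineComments (content fullCode : List Char) (startPos endPos : Nat) : List Char :=
  let lineStart : Int := PySem.Chars.rfindFrom fullCode ['\n'] 0 (some (startPos : Int)) + 1
  let beforeComment := PySem.List.slice fullCode (some lineStart) (some (startPos : Int))
  let codeBefore := PySem.Chars.strip beforeComment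
  let cleanLines := extractCommentText content
  if cleanLines = [] then []
  else if codeBefore ≠ [] then "  // ".toList ++ PySem.Chars.join [' '] cleanLines
  else if cleanLines.length = 1 then "// ".toList ++ cleanLines.headI
  else
    let nextLineStart : Int := PySem.Chars.findFrom fullCode ['\n'] (endPos : Int) none + 1
    let indentStr : List Char :=
      if nextLineStart > 0 then
        let nextLineEnd : Int :=
          if PySem.Chars.findFrom fullCode ['\n'] nextLineStart none = -1 then (fullCode.length : Int)
          else PySem.Chars.findFrom fullCode ['\n'] nextLineStart none
        let nextLine := PySem.List.slice fullCode (some nextLineStart) (some nextLineEnd)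
        -- next_line.lstrip(' \t') ported by hand as dropWhile over the char set (exact)
        List.replicate (nextLine.length - (nextLine.dropWhile (fun c => c == ' ' || c == '\t')).length) ' '
      else []
    PySem.Chars.join ['\n']
      (("// ".toList ++ cleanLines.headI) ::
        (cleanLines.drop 1).map (fun c => indentStr ++ "// ".toList ++ c))

-- the main while-loop of A: index i, in_string, string_char
def loopA (cs : List Char) (i : Nat) (inStr : Bool) (sc : Option Char) : List Char :=
  if hi : i < cs.length then
    if cs[i] = '"' ∨ cs[i] = '\'' then
      if inStr = false then cs[i] :: loopA cs (i + 1) true (some cs[i])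
      else if some cs[i] = sc ∧ (i = 0 ∨ PySem.List.pyGet? cs ((i : Int) - 1) ≠ some '\\') then
        cs[i] :: loopA cs (i + 1) false sc
      else cs[i] :: loopA cs (i + 1) inStr sc
    else if inStr then cs[i] :: loopA cs (i + 1) inStr sc
    else if hc : PySem.List.slice cs (some (i : Int)) (some ((i : Int) + 2)) = ['/', '*'] then
      if he : PySem.Chars.findFrom cs ['*', '/'] ((i : Int) + 2) none = -1 then
        PySem.List.slice cs (some (i : Int)) none
      else
        -- Python binds end/comment_content/converted to locals; they are inlined here
        if isRealDoxygen cs i (PySem.List.slice cs (some ((i : Int) + 2))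
            (some (PySem.Chars.findFrom cs ['*', '/'] ((i : Int) + 2) none))) then
          PySem.List.slice cs (some (i : Int))
              (some (PySem.Chars.findFrom cs ['*', '/'] ((i : Int) + 2) none + 2)) ++
            loopA cs ((PySem.Chars.findFrom cs ['*', '/'] ((i : Int) + 2) none).toNat + 2) inStr sc
        else
          (if convertToLineComments (PySem.List.slice cs (some ((i : Int) + 2))
                (some (PySem.Chars.findFrom cs ['*', '/'] ((i : Int) + 2) none))) cs i
                (PySem.Chars.findFrom cs ['*', '/'] ((i : Int) + 2) none).toNat ≠ [] then
            convertToLineComments (PySem.List.slice cs (some ((i : Int) + 2))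
                (some (PySem.Chars.findFrom cs ['*', '/'] ((i : Int) + 2) none))) cs i
                (PySem.Chars.findFrom cs ['*', '/'] ((i : Int) + 2) none).toNat
          else []) ++ loopA cs ((PySem.Chars.findFrom cs ['*', '/'] ((i : Int) + 2) none).toNat + 2) inStr sc
    else cs[i] :: loopA cs (i + 1) inStr sc
  else []
termination_by cs.length - i
decreasing_by
  · omega
  · omega
  · omega
  · omega
  · -- doxygen branch: e ≥ i + 2
    have hlen : i + 2 ≤ cs.length := by
      have h2 : PySem.List.slice cs (some (i : Int)) (some ((i : Int) + 2)) = List.take 2 (List.drop i cs) := by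
        have : ((i : Int) + 2) = ((i + 2 : Nat) : Int) := by push_cast; ring
        rw [this, PySem.List.slice_natCast]
        congr 1; omega
      rw [h2] at hc
      have : (List.take 2 (List.drop i cs)).length = 2 := by rw [hc]; rfl
      simp at this; omega
    have hcast : ((i : Int) + 2) = ((i + 2 : Nat) : Int) := by push_cast; ring
    rw [hcast] at he
    have hspec := (PySem.Chars.findFrom_natCast_spec cs ['*', '/'] (i + 2) hlen he).1
    rw [← hcast] at hspec
    omega
  · -- same bound for the converted branch
    have hlen : i + 2 ≤ cs.length := by
      have h2 : PySem.List.slice cs (some (i : Int)) (some ((i : Int) + 2)) = List.take 2 (List.drop i cs) := by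
        have : ((i : Int) + 2) = ((i + 2 : Nat) : Int) := by push_cast; ring
        rw [this, PySem.List.slice_natCast]
        congr 1; omega
      rw [h2] at hc
      have : (List.take 2 (List.drop i cs)).length = 2 := by rw [hc]; rfl
      simp at this; omega
    have hcast : ((i : Int) + 2) = ((i + 2 : Nat) : Int) := by push_cast; ring
    rw [hcast] at he
    have hspec := (PySem.Chars.findFrom_natCast_spec cs ['*', '/'] (i + 2) hlen he).1
    rw [← hcast] at hspec
    omega
  · omega

def convert_block_comments (code : String) : String :=
  String.mk (loopA code.toList 0 false none)

-- ===== PORT B =====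

-- a token of Source B's phase 1: a verbatim span [i, j) or a block comment at [s, e) (e = '*/')
inductive Tok
  | v : Nat → Nat → Tok
  | c : Nat → Nat → Tok
deriving DecidableEq, Repr

-- _DOXY_KW = '...'.split()
def doxyB : List (List Char) :=
  PySem.Chars.split₀
    "@brief @param @return @note @warning @see @file @def @enum @struct @typedef @var \\brief \\param \\return \\note".toList

-- the trim predicate of _clean's two index scans: s[k] == '*' or s[k].isspace()
def pjunk (c : Char) : Bool := c == '*' || PySem.Chars.isspace c

-- while a < b and (s[a] == '*' or s[a].isspace()): a += 1
def scanJ (s : List Char) (a b : Nat) : Nat :=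
  if a < b ∧ (s[a]?.any pjunk) then scanJ s (a + 1) b else a
termination_by b - a
decreasing_by omega

-- while b > a and (s[b-1] == '*' or s[b-1].isspace()): b -= 1
def scanK (s : List Char) (a b : Nat) : Nat :=
  if a < b ∧ (s[b - 1]?.any pjunk) then scanK s a (b - 1) else b
termination_by b
decreasing_by omega

-- _clean
def cleanB (line : List Char) : List Char :=
  let s := PySem.Chars.strip line
  let a := scanJ s 0 s.length
  let b := scanK s a s.length
  PySem.Chars.strip
    (PySem.Chars.stripChars (PySem.List.slice s (some (a : Int)) (some (b : Int))) ['=', '-'])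

-- j = i+1; while j < n and not (code[j] == q and code[j-1] != '\\'): j += 1
def scanString (cs : List Char) (q : Char) (j : Nat) : Nat :=
  if h : j < cs.length then
    if cs[j] = q ∧ PySem.List.pyGet? cs ((j : Int) - 1) ≠ some '\\' then j
    else scanString cs q (j + 1)
  else j
termination_by cs.length - j

-- j = i+1; while j < n and code[j] != '"' and code[j] != "'" and not code.startswith('/*', j): j += 1
def scanPlain (cs : List Char) (j : Nat) : Nat :=
  if h : j < cs.length then
    if cs[j] ≠ '"' ∧ cs[j] ≠ '\'' ∧ ¬ PySem.Chars.startswith (cs.drop j) ['/', '*'] then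
      scanPlain cs (j + 1)
    else j
  else j
termination_by cs.length - j

-- k = nl; while k < len(code) and code[k] in ' \t': k += 1
def scanIndent (cs : List Char) (k : Nat) : Nat :=
  if h : k < cs.length then
    if cs[k] = ' ' ∨ cs[k] = '\t' then scanIndent cs (k + 1) else k
  else k
termination_by cs.length - k

theorem scanString_ge (cs : List Char) (q : Char) (j : Nat) : j ≤ scanString cs q j := by
  fun_induction scanString with
  | case1 => omega
  | case2 j h hc ih => omega
  | case3 => omega

theorem scanPlain_ge (cs : List Char) (j : Nat) : j ≤ scanPlain cs j := by
  fun_induction scanPlain with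
  | case1 j h hc ih => omega
  | case2 => omega
  | case3 => omega

-- the '/*' guard of Source B (startswith) gives the two-char bound used for termination
theorem startswith_comment_len {cs : List Char} {i : Nat}
    (hs : PySem.Chars.startswith (cs.drop i) ['/', '*'] = true) : i + 2 ≤ cs.length := by
  have := ((PySem.Chars.startswith_iff _ _).mp hs).length_le
  simp at this
  omega

-- _emit
def emitComment (cs : List Char) (s e : Nat) : List Char :=
  let content := PySem.List.slice cs (some ((s : Int) + 2)) (some (e : Int))
  let h := PySem.List.slice cs (some ((s : Int) + 2)) (some ((s : Int) + 4))
  if h.take 1 = ['!'] ∨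
      (h.take 1 = ['*'] ∧ h.length = 2 ∧ PySem.List.pyGet? h 1 ≠ some '*' ∧
        doxyB.any (fun kw => PySem.Chars.isIn kw content)) then
    PySem.List.slice cs (some (s : Int)) (some ((e : Int) + 2))
  else
    let clean := ((PySem.Chars.splitOn content ['\n']).map cleanB).filter (fun t => !t.isEmpty)
    if clean = [] then []
    else
      let ls : Int := PySem.Chars.rfindFrom cs ['\n'] 0 (some (s : Int)) + 1
      if PySem.Chars.strip (PySem.List.slice cs (some ls) (some (s : Int))) ≠ [] then
        "  // ".toList ++ PySem.Chars.join [' '] clean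
      else if clean.length = 1 then "// ".toList ++ clean.headI
      else
        let nl : Int := PySem.Chars.findFrom cs ['\n'] (e : Int) none + 1
        let pad : List Char :=
          if nl > 0 then List.replicate (scanIndent cs nl.toNat - nl.toNat) ' ' else []
        "// ".toList ++ PySem.Chars.join ('\n' :: (pad ++ "// ".toList)) clean

-- phase 1: _tokens
def tokenize (cs : List Char) (i : Nat) : List Tok :=
  if hi : i < cs.length then
    if cs[i] = '"' ∨ cs[i] = '\'' then
      let j := min (scanString cs cs[i] (i + 1) + 1) cs.length
      Tok.v i j :: tokenize cs j
    else if hs : PySem.Chars.startswith (cs.drop i) ['/', '*'] then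
      if he : PySem.Chars.findFrom cs ['*', '/'] ((i : Int) + 2) none = -1 then
        [Tok.v i cs.length]
      else
        let e := (PySem.Chars.findFrom cs ['*', '/'] ((i : Int) + 2) none).toNat
        Tok.c i e :: tokenize cs (e + 2)
    else
      let j := scanPlain cs (i + 1)
      Tok.v i j :: tokenize cs j
  else []
termination_by cs.length - i
decreasing_by
  · have := scanString_ge cs cs[i] (i + 1)
    omega
  · have hlen := startswith_comment_len hs
    have hcast : ((i : Int) + 2) = ((i + 2 : Nat) : Int) := by push_cast; ring
    rw [hcast] at he
    have hspec := (PySem.Chars.findFrom_natCast_spec cs ['*', '/'] (i + 2) hlen he).1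
    rw [← hcast] at hspec
    omega
  · have := scanPlain_ge cs (i + 1)
    omega

-- phase 2
def renderTok (cs : List Char) : Tok → List Char
  | Tok.v i j => PySem.List.slice cs (some (i : Int)) (some (j : Int))
  | Tok.c s e => emitComment cs s e

def convert_block_comments_alt (code : String) : String :=
  String.mk (PySem.Chars.join [] ((tokenize code.toList 0).map (renderTok code.toList)))

-- ===== PRECONDITION & SPEC =====
def Spec_convert_block_comments (code : String) (out : String) : Prop := out = convert_block_comments_alt code
instance (code : String) (out : String) : Decidable (Spec_convert_block_comments code out) := by unfold Spec_convert_block_comments; infer_instance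

-- ===== CLAIM (what is proved, stated in full; the proofs are below) =====
def Claim_equal_convert_block_comments : Prop := ∀ (code : String), Dom_convert_block_comments code → Spec_convert_block_comments code (convert_block_comments code)

-- ===== LEMMAS AND PROOFS =====

theorem doxyB_eq : doxyB = doxyKws := by decide

-- ''.join
theorem join_empty_sep (parts : List (List Char)) :
    PySem.Chars.join [] parts = parts.flatten := by
  simp only [PySem.Chars.join, List.intercalate]
  induction parts with
  | nil => rfl
  | cons a t ih => cases t <;> simp_all [List.intersperse]

-- Source B's startswith('/*', i) ↔ A's code[i:i+2] == '/*'
theorem startswith_slice_iff (cs : List Char) (i : Nat) :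
    PySem.Chars.startswith (cs.drop i) ['/', '*'] = true ↔
      PySem.List.slice cs (some (i : Int)) (some ((i : Int) + 2)) = ['/', '*'] := by
  rw [PySem.Chars.startswith_iff, List.prefix_iff_eq_take]
  have h2 : PySem.List.slice cs (some (i : Int)) (some ((i : Int) + 2)) = List.take 2 (List.drop i cs) := by
    have : ((i : Int) + 2) = ((i + 2 : Nat) : Int) := by push_cast; ring
    rw [this, PySem.List.slice_natCast]
    congr 1; omega
  rw [h2]
  exact ⟨fun h => h.symm, fun h => h.symm⟩

-- ---- generic list facts used by the indent computation ----

theorem takeWhile_take_of_le {α : Type} (p : α → Bool) (l : List α) (m : Nat)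
    (h : (l.takeWhile p).length ≤ m) : (l.take m).takeWhile p = l.takeWhile p := by
  induction l generalizing m with
  | nil => simp
  | cons a t ih =>
    cases m with
    | zero =>
      cases hp : p a
      · simp [List.takeWhile_cons, hp]
      · simp [List.takeWhile_cons, hp] at h
    | succ m =>
      cases hp : p a
      · simp [List.takeWhile_cons, hp]
      · simp only [List.takeWhile_cons, hp, if_true, List.take_succ_cons]
        rw [ih m (by simpa [List.takeWhile_cons, hp] using h)]

theorem takeWhile_len_le_of_false {α : Type} (p : α → Bool) (l : List α) (m : Nat)
    (hm : m < l.length) (hpm : p (l[m]'hm) = false) : (l.takeWhile p).length ≤ m := by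
  induction l generalizing m with
  | nil => simp
  | cons a t ih =>
    cases hp : p a
    · simp [List.takeWhile_cons, hp]
    · cases m with
      | zero => rw [List.getElem_cons_zero] at hpm; rw [hpm] at hp; cases hp
      | succ m =>
        simp only [List.takeWhile_cons, hp, if_true, List.length_cons]
        have := ih m (by simpa using hm) (by simpa using hpm)
        omega

-- scanIndent computes the length of the leading run of spaces/tabs of cs.drop k
theorem scanIndent_spec (cs : List Char) (k : Nat) :
    scanIndent cs k = k + ((cs.drop k).takeWhile (fun c => c == ' ' || c == '\t')).length := by
  fun_induction scanIndent with
  | case1 k h hc ih =>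
    rw [List.drop_eq_getElem_cons h, List.takeWhile_cons, if_pos (by
      rcases hc with hc | hc <;> simp [hc])]
    simp only [List.length_cons]
    omega
  | case2 k h hc =>
    rw [List.drop_eq_getElem_cons h, List.takeWhile_cons, if_neg (by
      simp only [not_or] at hc
      simp [hc.1, hc.2])]
    simp
  | case3 k h =>
    rw [List.drop_eq_nil_of_le (by omega)]
    simp

-- facts extracted from the '/*' guard
theorem comment_guard {cs : List Char} {i : Nat}
    (hc : PySem.List.slice cs (some (i : Int)) (some ((i : Int) + 2)) = ['/', '*']) :
    i + 2 ≤ cs.length := by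
  have h2 : PySem.List.slice cs (some (i : Int)) (some ((i : Int) + 2)) = List.take 2 (List.drop i cs) := by
    have hcast : ((i : Int) + 2) = ((i + 2 : Nat) : Int) := by push_cast; ring
    rw [hcast, PySem.List.slice_natCast]
    congr 1; omega
  rw [h2] at hc
  have : (List.take 2 (List.drop i cs)).length = 2 := by rw [hc]; rfl
  simp at this; omega

theorem find_comment_end {cs : List Char} {i : Nat}
    (hc : PySem.List.slice cs (some (i : Int)) (some ((i : Int) + 2)) = ['/', '*'])
    (he : PySem.Chars.findFrom cs ['*', '/'] ((i : Int) + 2) none ≠ -1) :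
    (i : Int) + 2 ≤ PySem.Chars.findFrom cs ['*', '/'] ((i : Int) + 2) none ∧
      (PySem.Chars.findFrom cs ['*', '/'] ((i : Int) + 2) none).toNat + 2 ≤ cs.length := by
  have hlen := comment_guard hc
  have hcast : ((i : Int) + 2) = ((i + 2 : Nat) : Int) := by push_cast; ring
  rw [hcast] at he ⊢
  have hspec := PySem.Chars.findFrom_natCast_spec cs ['*', '/'] (i + 2) hlen he
  refine ⟨hspec.1, ?_⟩
  have hpre := hspec.2.1
  have hlen2 := hpre.length_le
  simp only [List.length_drop, List.length_cons, List.length_nil] at hlen2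
  omega

-- ---- the string-literal phase ----

theorem string_phase (cs : List Char) (q : Char) (hq : q = '"' ∨ q = '\'') :
    ∀ (j : Nat), 1 ≤ j →
      loopA cs j true (some q) =
        List.take ((if scanString cs q j < cs.length then scanString cs q j + 1 else scanString cs q j) - j)
            (List.drop j cs) ++
          loopA cs (if scanString cs q j < cs.length then scanString cs q j + 1 else scanString cs q j)
            false (some q) := by
  intro j
  fun_induction scanString cs q j with
  | case1 j h hstop =>
    intro hj
    rw [if_pos h]
    rw [loopA, dif_pos (by omega : j < cs.length)]
    rw [if_pos (by rw [hstop.1]; exact hq)]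
    rw [if_neg (by simp)]
    rw [if_pos ⟨by rw [hstop.1], Or.inr hstop.2⟩]
    rw [List.drop_eq_getElem_cons h]
    have h1 : j + 1 - j = 1 := by omega
    rw [h1, List.take_succ_cons, List.take_zero]
    rfl
  | case2 j h hstop ih =>
    intro hj
    have hge := scanString_ge cs q (j + 1)
    -- A makes one in-string step at j
    have hstep : loopA cs j true (some q) = cs[j] :: loopA cs (j + 1) true (some q) := by
      rw [loopA, dif_pos h]
      by_cases hcq : cs[j] = '"' ∨ cs[j] = '\''
      · rw [if_pos hcq, if_neg (by simp)]
        rw [if_neg (by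
          rintro ⟨he1, he2⟩
          rcases he2 with he2 | he2
          · omega
          · exact hstop ⟨by injection he1, he2⟩)]
      · rw [if_neg hcq, if_pos rfl]
    rw [hstep, ih (by omega)]
    rw [List.drop_eq_getElem_cons h]
    split
    · have h2 : scanString cs q (j + 1) + 1 - j = (scanString cs q (j + 1) + 1 - (j + 1)) + 1 := by omega
      rw [h2, List.take_succ_cons]
      simp
    · have h2 : scanString cs q (j + 1) - j = (scanString cs q (j + 1) - (j + 1)) + 1 := by omega
      rw [h2, List.take_succ_cons]
      simp
  | case3 j h =>
    intro hj
    rw [if_neg h]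
    have h0 : j - j = 0 := by omega
    rw [h0, List.take_zero, List.nil_append]
    rw [loopA, dif_neg h, loopA, dif_neg h]

theorem scanString_le (cs : List Char) (q : Char) :
    ∀ j, j ≤ cs.length → scanString cs q j ≤ cs.length := by
  intro j
  fun_induction scanString cs q j with
  | case1 j h hc => intro _; omega
  | case2 j h hc ih => intro _; exact ih (by omega)
  | case3 j h => intro hj; omega

-- Source B's min(j+1, n) is A's conditional bump
theorem min_bump (cs : List Char) (q : Char) (j : Nat) (hj : j ≤ cs.length) :
    min (scanString cs q j + 1) cs.length =
      if scanString cs q j < cs.length then scanString cs q j + 1 else scanString cs q j := by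
  have := scanString_le cs q j hj
  split <;> omega

-- ---- the plain-text phase ----

theorem plain_phase (cs : List Char) (sc : Option Char) :
    ∀ (j : Nat),
      loopA cs j false sc =
        List.take (scanPlain cs j - j) (List.drop j cs) ++ loopA cs (scanPlain cs j) false sc := by
  intro j
  fun_induction scanPlain cs j with
  | case1 j h hgo ih =>
    have hge := scanPlain_ge cs (j + 1)
    have hstep : loopA cs j false sc = cs[j] :: loopA cs (j + 1) false sc := by
      rw [loopA, dif_pos h, if_neg (by tauto), if_neg (by simp),
        dif_neg (fun hsl => hgo.2.2 ((startswith_slice_iff cs j).mpr hsl))]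
    rw [hstep, ih, List.drop_eq_getElem_cons h]
    have h2 : scanPlain cs (j + 1) - j = (scanPlain cs (j + 1) - (j + 1)) + 1 := by omega
    rw [h2, List.take_succ_cons]
    simp
  | case2 j h hgo =>
    have h0 : j - j = 0 := by omega
    rw [h0, List.take_zero, List.nil_append]
  | case3 j h =>
    have h0 : j - j = 0 := by omega
    rw [h0, List.take_zero, List.nil_append]

-- ---- the cleaned-line computation: A's strip loops = B's two index scans ----

theorem dropWhile_pjunk_lstrip (t : List Char) :
    List.dropWhile pjunk (List.dropWhile PySem.Chars.isspace t) = List.dropWhile pjunk t := by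
  induction t with
  | nil => rfl
  | cons c r ih =>
    by_cases hws : PySem.Chars.isspace c
    · have hp : pjunk c = true := by simp [pjunk, hws]
      simp [List.dropWhile_cons, hws, hp, ih]
    · simp [List.dropWhile_cons, hws]

theorem noLead_of_prefix {p : Char → Bool} {l l' : List Char}
    (hpre : l' <+: l) (hl : List.dropWhile p l = l) : List.dropWhile p l' = l' := by
  rw [List.dropWhile_eq_self_iff] at hl ⊢
  intro h0
  rcases hpre with ⟨t, ht⟩
  subst ht
  have hlen : 0 < (l' ++ t).length := by simp; omega
  have := hl hlen
  rwa [List.getElem_append_left h0] at this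

-- A's left star loop is one dropWhile
theorem starL_eq : ∀ (z : List Char), List.dropWhile PySem.Chars.isspace z = z →
    stripStarsL z = List.dropWhile pjunk z := by
  intro z
  fun_induction stripStarsL with
  | case1 z h ih =>
    intro hz
    rcases z with _ | ⟨c, t⟩
    · simp [PySem.Chars.startswith] at h
    · have hstar : c = '*' := by
        have := (PySem.Chars.startswith_iff _ _).mp h
        rcases this with ⟨r, hr⟩
        injection hr with h1 _
        exact h1.symm
      have hsl : PySem.List.slice (c :: t) (some 1) none = t := by
        rw [PySem.List.slice_from _ (by norm_num)]; rfl
      rw [hsl] at ih ⊢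
      rw [ih (by simp [PySem.Chars.lstrip, List.dropWhile_idempotent])]
      rw [List.dropWhile_cons, if_pos (by simp [pjunk, hstar])]
      simp only [PySem.Chars.lstrip]
      exact dropWhile_pjunk_lstrip t
  | case2 z h =>
    intro hz
    rcases z with _ | ⟨c, t⟩
    · rfl
    · have hcs : c ≠ '*' := by
        intro hc
        exact h ((PySem.Chars.startswith_iff _ _).mpr ⟨t, by rw [hc]; rfl⟩)
      have hcw : ¬ PySem.Chars.isspace c := by
        rw [List.dropWhile_eq_self_iff] at hz
        simpa using hz (by simp)
      rw [List.dropWhile_cons, if_neg (by simp [pjunk, hcs, hcw])]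

-- A's right star loop is one reversed dropWhile
theorem starR_eq : ∀ (z : List Char),
    List.dropWhile PySem.Chars.isspace z.reverse = z.reverse →
    stripStarsR z = (List.dropWhile pjunk z.reverse).reverse := by
  intro z
  fun_induction stripStarsR with
  | case1 z h ih =>
    intro hz
    have hne : z ≠ [] := by
      intro hzz; subst hzz; simp [PySem.Chars.endswith] at h
    have hsl : PySem.List.slice z none (some (-1)) = z.dropLast := by simp [pysem]
    have hlast : z.getLast hne = '*' := by
      have := (PySem.Chars.endswith_iff _ _).mp h
      rcases this with ⟨r, hr⟩
      have : z.getLast hne = (r ++ ['*']).getLast (by simp) := by congr 1; exact hr.symm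
      rw [this, List.getLast_append_singleton]
    have hrevz : z.reverse = '*' :: z.dropLast.reverse := by
      conv_lhs => rw [← List.dropLast_append_getLast hne]
      rw [List.reverse_append, hlast]
      rfl
    rw [hsl] at ih ⊢
    have hrs : (PySem.Chars.rstrip z.dropLast).reverse =
        List.dropWhile PySem.Chars.isspace z.dropLast.reverse := by
      simp [PySem.Chars.rstrip]
    rw [ih (by rw [hrs, List.dropWhile_idempotent])]
    rw [hrevz, List.dropWhile_cons, if_pos (by simp [pjunk]), hrs,
      dropWhile_pjunk_lstrip]
  | case2 z h =>
    intro hz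
    rcases hrz : z.reverse with _ | ⟨c, t⟩
    · have : z = [] := by simpa using congrArg List.reverse hrz
      simp [this]
    · have hne : z ≠ [] := by
        intro hzz; subst hzz; simp at hrz
      have hlast : z.getLast hne = c := by
        have h1 : z.getLast? = some c := by
          rw [← List.head?_reverse, hrz, List.head?_cons]
        rwa [List.getLast?_eq_getLast hne, Option.some_inj] at h1
      have hz2 : z.dropLast ++ [c] = z := by
        conv_rhs => rw [← List.dropLast_append_getLast hne]
        rw [hlast]
      have hcs : c ≠ '*' := by
        intro hc
        apply h
        rw [PySem.Chars.endswith_iff]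
        exact ⟨z.dropLast, by rw [← hc]; exact hz2⟩
      have hcw : ¬ PySem.Chars.isspace c := by
        rw [hrz] at hz
        rw [List.dropWhile_eq_self_iff] at hz
        simpa using hz (by simp)
      rw [List.dropWhile_cons, if_neg (by simp [pjunk, hcs, hcw]), ← hrz]
      simp

-- scanJ from 0 measures the junk prefix
theorem scanJ_spec (s : List Char) : ∀ (a : Nat),
    scanJ s a s.length = a + ((s.drop a).takeWhile pjunk).length := by
  intro a
  fun_induction scanJ s a s.length with
  | case1 a h ih =>
    have ha : a < s.length := h.1
    have hp : pjunk s[a] := by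
      have := h.2
      rwa [List.getElem?_eq_getElem ha, Option.any_some] at this
    rw [ih, List.drop_eq_getElem_cons ha, List.takeWhile_cons, if_pos hp]
    simp only [List.length_cons]
    omega
  | case2 a h =>
    by_cases ha : a < s.length
    · have hp : pjunk (s[a]'ha) = false := by
        by_contra hp
        exact h ⟨ha, by rw [List.getElem?_eq_getElem ha, Option.any_some]; simpa using hp⟩
      rw [List.drop_eq_getElem_cons ha, List.takeWhile_cons, if_neg (by simp [hp])]
      simp
    · rw [List.drop_eq_nil_of_le (by omega)]
      simp

-- dropWhileRight step
theorem rdrop_append_singleton (p : Char → Bool) (l : List Char) (x : Char) :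
    (List.dropWhile p (l ++ [x]).reverse).reverse =
      if p x then (List.dropWhile p l.reverse).reverse else l ++ [x] := by
  rw [List.reverse_append, List.reverse_singleton, List.singleton_append, List.dropWhile_cons]
  by_cases hp : p x
  · rw [if_pos hp, if_pos hp]
  · rw [if_neg hp, if_neg hp]
    simp

-- scanK measures the junk suffix of s.take b beyond a = |takeWhile pjunk s|
theorem scanK_spec (s : List Char) (a : Nat) (ha : a = (s.takeWhile pjunk).length) :
    ∀ (b : Nat), a ≤ b → b ≤ s.length →
      scanK s a b = a + ((List.dropWhile pjunk ((s.take b).drop a).reverse).reverse).length := by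
  intro b
  fun_induction scanK s a b with
  | case1 b h ih =>
    intro hab hb
    have hb1 : b - 1 < s.length := by omega
    have hp : pjunk (s[b-1]'hb1) := by
      have := h.2
      rwa [List.getElem?_eq_getElem hb1, Option.any_some] at this
    have hsplit : (s.take b).drop a = (s.take (b - 1)).drop a ++ [s[b-1]'hb1] := by
      have h1 : s.take b = s.take (b - 1) ++ [s[b-1]'hb1] := by
        have h2 : s.take (b - 1 + 1) = s.take (b - 1) ++ [s[b-1]'hb1] := by
          rw [List.take_succ, List.getElem?_eq_getElem hb1]
          simp
        rw [show b - 1 + 1 = b by omega] at h2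
        exact h2
      rw [h1, List.drop_append_of_le_length (by simp; omega)]
    by_cases hab1 : a ≤ b - 1
    · rw [ih hab1 (by omega), hsplit, rdrop_append_singleton, if_pos hp]
    · -- a = b, impossible since a < b
      omega
  | case2 b h =>
    intro hab hb
    by_cases hba : a < b
    · have hb1 : b - 1 < s.length := by omega
      have hp : pjunk (s[b - 1]'hb1) = false := by
        by_contra hp
        exact h ⟨hba, by rw [List.getElem?_eq_getElem hb1, Option.any_some]; simpa using hp⟩
      have hsplit : (s.take b).drop a = (s.take (b - 1)).drop a ++ [s[b - 1]'hb1] := by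
        have h1 : s.take b = s.take (b - 1) ++ [s[b - 1]'hb1] := by
          have h2 : s.take (b - 1 + 1) = s.take (b - 1) ++ [s[b - 1]'hb1] := by
            rw [List.take_succ, List.getElem?_eq_getElem hb1]
            simp
          rw [show b - 1 + 1 = b by omega] at h2
          exact h2
        rw [h1, List.drop_append_of_le_length (by simp; omega)]
      rw [hsplit, rdrop_append_singleton, if_neg (by simp [hp])]
      simp only [List.length_append, List.length_drop, List.length_take,
        List.length_cons, List.length_nil]
      omega
    · have hba' : b = a := by omega
      subst hba'
      rw [List.drop_eq_nil_of_le (by simp)]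
      simp

-- the dropWhile-right result is a prefix: taking its length recovers it
theorem rdrop_take (p : Char → Bool) (t : List Char) :
    List.take ((List.dropWhile p t.reverse).reverse).length t =
      (List.dropWhile p t.reverse).reverse := by
  have hsplit : (List.dropWhile p t.reverse).reverse ++ (List.takeWhile p t.reverse).reverse = t := by
    rw [← List.reverse_append, List.takeWhile_append_dropWhile, List.reverse_reverse]
  have h2 := List.take_left (l₁ := (List.dropWhile p t.reverse).reverse)
    (l₂ := (List.takeWhile p t.reverse).reverse)
  rwa [hsplit] at h2

-- B's trim scans compute A's star-loop pipeline
theorem clean_eq (line : List Char) : cleanB line = cleanLine line := by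
  unfold cleanB cleanLine
  set s := PySem.Chars.strip line with hs
  -- strip line has no leading whitespace
  have hsl : List.dropWhile PySem.Chars.isspace s = s := by
    have h1 : s = PySem.Chars.rstrip (PySem.Chars.lstrip line) := rfl
    have hpre : s <+: PySem.Chars.lstrip line := by
      rw [h1]
      simp only [PySem.Chars.rstrip]
      refine ⟨(List.takeWhile PySem.Chars.isspace (PySem.Chars.lstrip line).reverse).reverse, ?_⟩
      rw [← List.reverse_append, List.takeWhile_append_dropWhile, List.reverse_reverse]
    exact noLead_of_prefix hpre (by simp [PySem.Chars.lstrip, List.dropWhile_idempotent])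
  -- and no trailing whitespace
  have hsr : List.dropWhile PySem.Chars.isspace s.reverse = s.reverse := by
    have h1 : s.reverse = List.dropWhile PySem.Chars.isspace (PySem.Chars.lstrip line).reverse := by
      simp [hs, PySem.Chars.strip, PySem.Chars.rstrip]
    rw [h1, List.dropWhile_idempotent]
  -- left loop
  have hL : stripStarsL s = List.dropWhile pjunk s := starL_eq s hsl
  -- the left result has no trailing whitespace (it is a suffix of s)
  have hur : List.dropWhile PySem.Chars.isspace (List.dropWhile pjunk s).reverse =
      (List.dropWhile pjunk s).reverse := by
    refine noLead_of_prefix ?_ hsr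
    have hsuf : List.dropWhile pjunk s <:+ s := List.dropWhile_suffix pjunk
    exact List.reverse_prefix.mpr hsuf
  have hR : stripStarsR (List.dropWhile pjunk s) =
      (List.dropWhile pjunk (List.dropWhile pjunk s).reverse).reverse := starR_eq _ hur
  -- B's slice equals the same value
  have ha := scanJ_spec s 0
  simp only [List.drop_zero, Nat.zero_add] at ha
  have hb := scanK_spec s (scanJ s 0 s.length) (by rw [ha]) s.length (by
      rw [ha]; exact (List.takeWhile_prefix _).length_le) (le_refl _)
  have hdrop : s.drop (s.takeWhile pjunk).length = List.dropWhile pjunk s := by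
    have h2 := List.drop_left (l₁ := s.takeWhile pjunk) (l₂ := s.dropWhile pjunk)
    rwa [List.takeWhile_append_dropWhile] at h2
  have hslice : PySem.List.slice s (some ((scanJ s 0 s.length : Nat) : Int))
      (some ((scanK s (scanJ s 0 s.length) s.length : Nat) : Int)) =
      (List.dropWhile pjunk (List.dropWhile pjunk s).reverse).reverse := by
    rw [PySem.List.slice_natCast, hb, ha, List.take_length, hdrop,
      Nat.add_sub_cancel_left]
    exact rdrop_take pjunk (List.dropWhile pjunk s)
  show PySem.Chars.strip (PySem.Chars.stripChars
      (PySem.List.slice s (some ((scanJ s 0 s.length : Nat) : Int))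
        (some ((scanK s (scanJ s 0 s.length) s.length : Nat) : Int))) ['=', '-']) = _
  rw [hslice, hL, hR]

-- ---- the comment rendering ----

theorem extract_eq (content : List Char) :
    extractCommentText content =
      ((PySem.Chars.splitOn content ['\n']).map cleanLine).filter (fun c => !c.isEmpty) := by
  unfold extractCommentText
  rw [List.filter_map]
  have hfg : (fun (acc : List (List Char)) (line : List Char) =>
      have clean := cleanLine line
      if clean.isEmpty = false then acc ++ [clean] else acc) =
      (fun (acc : List (List Char)) (line : List Char) =>
        if (fun l => !(cleanLine l).isEmpty) line = true then acc ++ [cleanLine line] else acc) := by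
    funext acc line
    simp [Bool.not_eq_true']
  rw [hfg, PySem.List.foldl_append_if]
  simp [Function.comp_def]

theorem join_shift (ind pre : List Char) :
    ∀ (rest : List (List Char)) (c0 : List Char),
      PySem.Chars.join ['\n'] ((ind ++ pre ++ c0) :: rest.map (fun c => ind ++ pre ++ c)) =
        ind ++ pre ++ PySem.Chars.join ('\n' :: (ind ++ pre)) (c0 :: rest) := by
  intro rest
  induction rest with
  | nil => intro c0; simp [PySem.Chars.join_singleton]
  | cons c1 r ih =>
    intro c0
    rw [List.map_cons, PySem.Chars.join_cons_cons, ih c1, PySem.Chars.join_cons_cons]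
    simp

theorem join_eq (ind pre : List Char) (c0 : List Char) (rest : List (List Char)) :
    PySem.Chars.join ['\n'] ((pre ++ c0) :: rest.map (fun c => ind ++ pre ++ c)) =
      pre ++ PySem.Chars.join ('\n' :: (ind ++ pre)) (c0 :: rest) := by
  cases rest with
  | nil => simp [PySem.Chars.join_singleton]
  | cons c1 r =>
    rw [List.map_cons, PySem.Chars.join_cons_cons, join_shift ind pre r c1, PySem.Chars.join_cons_cons]
    simp

-- the two ways of measuring the next line's indentation agree
theorem indent_count_eq (cs : List Char) (k : Nat) (hk : k ≤ cs.length) :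
    (PySem.List.slice cs (some (k : Int))
        (some (if PySem.Chars.findFrom cs ['\n'] (k : Int) none = -1 then (cs.length : Int)
               else PySem.Chars.findFrom cs ['\n'] (k : Int) none))).length -
      ((PySem.List.slice cs (some (k : Int))
        (some (if PySem.Chars.findFrom cs ['\n'] (k : Int) none = -1 then (cs.length : Int)
               else PySem.Chars.findFrom cs ['\n'] (k : Int) none))).dropWhile
          (fun c => c == ' ' || c == '\t')).length
      = scanIndent cs k - k := by
  have hcount : ∀ t : List Char, t.length - (t.dropWhile (fun c => c == ' ' || c == '\t')).length
      = (t.takeWhile (fun c => c == ' ' || c == '\t')).length := by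
    intro t
    have := List.takeWhile_append_dropWhile (p := fun c => c == ' ' || c == '\t') (l := t)
    have hl := congrArg List.length this
    rw [List.length_append] at hl
    omega
  rw [scanIndent_spec cs k]
  by_cases h2 : PySem.Chars.findFrom cs ['\n'] (k : Int) none = -1
  · rw [if_pos h2]
    have hs : PySem.List.slice cs (some (k : Int)) (some (cs.length : Int)) =
        List.take (cs.length - k) (List.drop k cs) := PySem.List.slice_natCast cs k cs.length
    rw [hs, List.take_of_length_le (by simp), hcount]
    omega
  · rw [if_neg h2]
    have hspec2 := PySem.Chars.findFrom_natCast_spec cs ['\n'] k hk h2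
    have hm0 : (0 : Int) ≤ PySem.Chars.findFrom cs ['\n'] (k : Int) none := le_trans (by positivity) hspec2.1
    have hmcast : PySem.Chars.findFrom cs ['\n'] (k : Int) none =
        ((PySem.Chars.findFrom cs ['\n'] (k : Int) none).toNat : Int) := by omega
    set m := (PySem.Chars.findFrom cs ['\n'] (k : Int) none).toNat with hm
    have hkm : k ≤ m := by omega
    have hmlt : m < cs.length := by
      have := hspec2.2.1.length_le
      simp only [List.length_drop, List.length_cons, List.length_nil] at this
      omega
    have hchar : cs[m]'hmlt = '\n' := by
      rcases hspec2.2.1 with ⟨t, ht⟩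
      rw [List.drop_eq_getElem_cons hmlt, List.singleton_append] at ht
      injection ht with h1 _
      exact h1.symm
    rw [hmcast, PySem.List.slice_natCast, hcount]
    have hb : ((List.drop k cs).takeWhile (fun c => c == ' ' || c == '\t')).length ≤ m - k := by
      refine takeWhile_len_le_of_false _ _ (m - k) (by simp; omega) ?_
      rw [List.getElem_drop]
      have hkm' : k + (m - k) = m := by omega
      simp only [hkm']
      rw [hchar]
      rfl
    rw [takeWhile_take_of_le _ _ _ hb]
    omega

-- B's one head test (on code[s+2:s+4]) is A's is_real_doxygen decision, under the '/*' guard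
theorem head_cond_eq (cs : List Char) (i : Nat) (content : List Char)
    (hc : PySem.List.slice cs (some (i : Int)) (some ((i : Int) + 2)) = ['/', '*']) :
    ((PySem.List.slice cs (some ((i : Int) + 2)) (some ((i : Int) + 4))).take 1 = ['!'] ∨
      ((PySem.List.slice cs (some ((i : Int) + 2)) (some ((i : Int) + 4))).take 1 = ['*'] ∧
        (PySem.List.slice cs (some ((i : Int) + 2)) (some ((i : Int) + 4))).length = 2 ∧
        PySem.List.pyGet? (PySem.List.slice cs (some ((i : Int) + 2)) (some ((i : Int) + 4))) 1 ≠ some '*' ∧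
        doxyB.any (fun kw => PySem.Chars.isIn kw content) = true)) ↔
      isRealDoxygen cs i content = true := by
  have hlen := comment_guard hc
  -- normalise all the slices to takes/drops of d' := cs.drop (i+2)
  have hd2 : List.take 2 (List.drop i cs) = ['/', '*'] := by
    have h2 : PySem.List.slice cs (some (i : Int)) (some ((i : Int) + 2)) = List.take 2 (List.drop i cs) := by
      have : ((i : Int) + 2) = ((i + 2 : Nat) : Int) := by push_cast; ring
      rw [this, PySem.List.slice_natCast]
      congr 1; omega
    rw [← h2, hc]
  have hdcons : List.drop i cs = '/' :: '*' :: List.drop (i + 2) cs := by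
    have h1 : List.drop i cs = List.take 2 (List.drop i cs) ++ List.drop 2 (List.drop i cs) := by
      rw [List.take_append_drop]
    rw [hd2] at h1
    rw [h1, List.drop_drop]
    norm_num
  set d' := List.drop (i + 2) cs with hd'
  have hh : PySem.List.slice cs (some ((i : Int) + 2)) (some ((i : Int) + 4)) = List.take 2 d' := by
    have hcast2 : ((i : Int) + 2) = ((i + 2 : Nat) : Int) := by push_cast; ring
    have hcast4 : ((i : Int) + 4) = ((i + 4 : Nat) : Int) := by push_cast; ring
    rw [hcast2, hcast4, PySem.List.slice_natCast]
    congr 1; omega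
  have h3 : PySem.List.slice cs (some (i : Int)) (some ((i : Int) + 3)) = '/' :: '*' :: List.take 1 d' := by
    have hcast3 : ((i : Int) + 3) = ((i + 3 : Nat) : Int) := by push_cast; ring
    rw [hcast3, PySem.List.slice_natCast]
    have : i + 3 - i = 3 := by omega
    rw [this, hdcons]
    rfl
  have htake1 : (List.take 2 d').take 1 = List.take 1 d' := by
    rw [List.take_take]
    norm_num
  have hget3 : PySem.List.pyGet? cs ((i : Int) + 3) = d'[1]? := by
    have hcast3 : ((i : Int) + 3) = ((i + 3 : Nat) : Int) := by push_cast; ring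
    rw [hcast3, PySem.List.pyGet?_natCast, hd', List.getElem?_drop]
  have hget1 : PySem.List.pyGet? (List.take 2 d') 1 = d'[1]? := by
    rw [show ((1 : Int)) = ((1 : Nat) : Int) from rfl, PySem.List.pyGet?_natCast,
      List.getElem?_take_of_lt (by omega)]
  have hlen2 : (List.take 2 d').length = 2 ↔ i + 4 ≤ cs.length := by
    have hdl : d'.length = cs.length - (i + 2) := by rw [hd']; simp
    rw [List.length_take, hdl]
    omega
  have hdox : doxyB.any (fun kw => PySem.Chars.isIn kw content) = isDoxygenContent content := by
    rw [doxyB_eq]; rfl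
  unfold isRealDoxygen
  rw [hh, h3, htake1, hget1, hget3, hdox]
  constructor
  · rintro (hbang | ⟨hstar, hl2, hne, hdx⟩)
    · rw [if_pos (by rw [hbang]; rfl)]
    · have hne3 : ¬ ('/' :: '*' :: List.take 1 d' = "/*!".toList) := by
        intro hx
        have : List.take 1 d' = ['!'] := by
          have := congrArg (List.drop 2) hx
          simpa using this
        rw [this] at hstar
        simp at hstar
      rw [if_neg hne3, if_pos (by rw [hstar]; rfl)]
      rw [if_pos ⟨by have := hlen2.mp hl2; omega, hne⟩]
      rw [if_pos hdx]
  · intro h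
    by_cases hbang : '/' :: '*' :: List.take 1 d' = "/*!".toList
    · left
      have := congrArg (List.drop 2) hbang
      simpa using this
    · rw [if_neg hbang] at h
      by_cases hstar : '/' :: '*' :: List.take 1 d' = "/**".toList
      · rw [if_pos hstar] at h
        split_ifs at h with ha hb
        right
        refine ⟨?_, ?_, ?_, hb⟩
        · have := congrArg (List.drop 2) hstar
          simpa using this
        · rw [hlen2]; omega
        · rcases ha with ⟨ha1, ha2⟩
          exact ha2
      · rw [if_neg hstar] at h
        cases h

-- B's _emit is A's doxygen-or-convert decision
theorem render_eq (cs : List Char) (i : Nat)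
    (hc : PySem.List.slice cs (some (i : Int)) (some ((i : Int) + 2)) = ['/', '*'])
    (he : PySem.Chars.findFrom cs ['*', '/'] ((i : Int) + 2) none ≠ -1) :
    emitComment cs i (PySem.Chars.findFrom cs ['*', '/'] ((i : Int) + 2) none).toNat =
      (if isRealDoxygen cs i
            (PySem.List.slice cs (some ((i : Int) + 2))
              (some (PySem.Chars.findFrom cs ['*', '/'] ((i : Int) + 2) none))) then
        PySem.List.slice cs (some (i : Int))
          (some (PySem.Chars.findFrom cs ['*', '/'] ((i : Int) + 2) none + 2))
      else
        convertToLineComments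
          (PySem.List.slice cs (some ((i : Int) + 2))
            (some (PySem.Chars.findFrom cs ['*', '/'] ((i : Int) + 2) none)))
          cs i (PySem.Chars.findFrom cs ['*', '/'] ((i : Int) + 2) none).toNat) := by
  have hee := find_comment_end hc he
  set e := PySem.Chars.findFrom cs ['*', '/'] ((i : Int) + 2) none with hedef
  have h0e : (0 : Int) ≤ e := le_trans (by positivity) hee.1
  have hcast : ((e.toNat : Nat) : Int) = e := Int.toNat_of_nonneg h0e
  rw [← hcast]
  simp only [Int.toNat_natCast]
  set en := e.toNat with hendef
  have henlen : en ≤ cs.length := by omega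
  simp only [emitComment]
  by_cases hd : isRealDoxygen cs i (PySem.List.slice cs (some ((i : Int) + 2)) (some (en : Int))) = true
  · rw [if_pos ((head_cond_eq cs i _ hc).mpr hd), if_pos hd]
  · rw [if_neg (fun h => hd ((head_cond_eq cs i _ hc).mp h)), if_neg hd]
    simp only [convertToLineComments]
    rw [extract_eq]
    have hmapeq : List.map cleanB
        (PySem.Chars.splitOn (PySem.List.slice cs (some ((i : Int) + 2)) (some (en : Int))) ['\n']) =
        List.map cleanLine
        (PySem.Chars.splitOn (PySem.List.slice cs (some ((i : Int) + 2)) (some (en : Int))) ['\n']) := by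
      exact List.map_congr_left (fun l _ => clean_eq l)
    rw [hmapeq]
    set clean := List.filter (fun c => !c.isEmpty)
      (List.map cleanLine (PySem.Chars.splitOn (PySem.List.slice cs (some ((i : Int) + 2)) (some (en : Int))) ['\n'])) with hcleandef
    by_cases h1 : clean = []
    · rw [if_pos h1, if_pos h1]
    · rw [if_neg h1, if_neg h1]
      by_cases h2 : PySem.Chars.strip (PySem.List.slice cs
          (some (PySem.Chars.rfindFrom cs ['\n'] 0 (some (i : Int)) + 1)) (some (i : Int))) ≠ []
      · rw [if_pos h2, if_pos h2]
      · rw [if_neg h2, if_neg h2]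
        by_cases h3 : clean.length = 1
        · rw [if_pos h3, if_pos h3]
        · rw [if_neg h3, if_neg h3]
          have hind : (if PySem.Chars.findFrom cs ['\n'] (en : Int) none + 1 > 0 then
                List.replicate
                  ((PySem.List.slice cs (some (PySem.Chars.findFrom cs ['\n'] (en : Int) none + 1))
                      (some (if PySem.Chars.findFrom cs ['\n'] (PySem.Chars.findFrom cs ['\n'] (en : Int) none + 1) none = -1
                             then (cs.length : Int)
                             else PySem.Chars.findFrom cs ['\n'] (PySem.Chars.findFrom cs ['\n'] (en : Int) none + 1) none))).length -
                    ((PySem.List.slice cs (some (PySem.Chars.findFrom cs ['\n'] (en : Int) none + 1))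
                      (some (if PySem.Chars.findFrom cs ['\n'] (PySem.Chars.findFrom cs ['\n'] (en : Int) none + 1) none = -1
                             then (cs.length : Int)
                             else PySem.Chars.findFrom cs ['\n'] (PySem.Chars.findFrom cs ['\n'] (en : Int) none + 1) none))).dropWhile
                        (fun c => c == ' ' || c == '\t')).length) ' '
              else []) =
              (if PySem.Chars.findFrom cs ['\n'] (en : Int) none + 1 > 0 then
                List.replicate (scanIndent cs (PySem.Chars.findFrom cs ['\n'] (en : Int) none + 1).toNat -
                  (PySem.Chars.findFrom cs ['\n'] (en : Int) none + 1).toNat) ' '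
              else []) := by
            by_cases hnl : PySem.Chars.findFrom cs ['\n'] (en : Int) none + 1 > 0
            · rw [if_pos hnl, if_pos hnl]
              have hrne : PySem.Chars.findFrom cs ['\n'] (en : Int) none ≠ -1 := by omega
              have hspec := PySem.Chars.findFrom_natCast_spec cs ['\n'] en henlen hrne
              have hrlt : (PySem.Chars.findFrom cs ['\n'] (en : Int) none).toNat < cs.length := by
                have := hspec.2.1.length_le
                simp only [List.length_drop, List.length_cons, List.length_nil] at this
                omega
              have hkc : PySem.Chars.findFrom cs ['\n'] (en : Int) none + 1 =
                  (((PySem.Chars.findFrom cs ['\n'] (en : Int) none).toNat + 1 : Nat) : Int) := by omega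
              rw [hkc]
              simp only [Int.toNat_natCast]
              rw [indent_count_eq cs _ (by omega)]
            · rw [if_neg hnl, if_neg hnl]
          simp only [hind]
          cases hclean : clean with
          | nil => exact absurd hclean h1
          | cons c0 rest =>
            simp only [List.headI_cons, List.drop_one, List.tail_cons]
            exact (join_eq _ _ c0 rest).symm

-- ---- the main equivalence: A's loop = flatten of B's rendered tokens ----

theorem main_loop_eq (cs : List Char) (i : Nat) (sc : Option Char) :
    loopA cs i false sc = ((tokenize cs i).map (renderTok cs)).flatten := by
  revert sc
  fun_induction tokenize cs i with
  | case1 i hi hq j ih =>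
    intro sc
    have hj : j = min (scanString cs cs[i] (i + 1) + 1) cs.length := rfl
    rw [loopA, dif_pos hi, if_pos hq, if_pos rfl]
    rw [string_phase cs cs[i] hq (i + 1) (by omega)]
    rw [← min_bump cs cs[i] (i + 1) (by omega), ← hj]
    rw [List.map_cons, List.flatten_cons, ← ih (some cs[i])]
    have hge := scanString_ge cs cs[i] (i + 1)
    have hgej : i + 1 ≤ j := by
      rw [hj]
      have := scanString_le cs cs[i] (i + 1) (by omega)
      omega
    simp only [renderTok]
    rw [PySem.List.slice_natCast cs i j, List.drop_eq_getElem_cons hi]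
    have h2 : j - i = (j - (i + 1)) + 1 := by omega
    rw [h2, List.take_succ_cons]
    simp
  | case2 i hi hq hs he =>
    intro sc
    have hc := (startswith_slice_iff cs i).mp hs
    rw [loopA, dif_pos hi, if_neg hq, if_neg (by simp), dif_pos hc, dif_pos he]
    simp only [List.map_cons, List.map_nil, List.flatten_cons, List.flatten_nil,
      List.append_nil, renderTok]
    rw [PySem.List.slice_natCast cs i cs.length, PySem.List.slice_from cs (by positivity)]
    simp
  | case3 i hi hq hs he e ih =>
    intro sc
    have hc := (startswith_slice_iff cs i).mp hs
    have hee : e = (PySem.Chars.findFrom cs ['*', '/'] ((i : Int) + 2) none).toNat := rfl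
    rw [loopA, dif_pos hi, if_neg hq, if_neg (by simp), dif_pos hc, dif_neg he]
    rw [List.map_cons, List.flatten_cons, ← ih sc]
    simp only [renderTok]
    rw [hee, render_eq cs i hc he]
    by_cases hd : isRealDoxygen cs i (PySem.List.slice cs (some ((i : Int) + 2))
        (some (PySem.Chars.findFrom cs ['*', '/'] ((i : Int) + 2) none))) = true
    · rw [if_pos hd, if_pos hd]
    · rw [if_neg hd, if_neg hd]
      by_cases hcv : convertToLineComments (PySem.List.slice cs (some ((i : Int) + 2))
          (some (PySem.Chars.findFrom cs ['*', '/'] ((i : Int) + 2) none))) cs i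
          (PySem.Chars.findFrom cs ['*', '/'] ((i : Int) + 2) none).toNat = []
      · rw [if_neg (not_not_intro hcv), hcv]
      · rw [if_pos hcv]
  | case4 i hi hq hs j ih =>
    intro sc
    have hc : ¬ PySem.List.slice cs (some (i : Int)) (some ((i : Int) + 2)) = ['/', '*'] :=
      fun hx => hs ((startswith_slice_iff cs i).mpr hx)
    have hj : j = scanPlain cs (i + 1) := rfl
    rw [loopA, dif_pos hi, if_neg hq, if_neg (by simp), dif_neg hc]
    -- A's first plain step, then the plain phase from i+1
    have hstep : loopA cs (i + 1) false sc =
        List.take (j - (i + 1)) (List.drop (i + 1) cs) ++ loopA cs j false sc := by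
      rw [hj]; exact plain_phase cs sc (i + 1)
    rw [hstep, List.map_cons, List.flatten_cons, ← ih sc]
    have hge := scanPlain_ge cs (i + 1)
    rw [← hj] at hge
    simp only [renderTok]
    rw [PySem.List.slice_natCast cs i j, List.drop_eq_getElem_cons hi]
    have h2 : j - i = (j - (i + 1)) + 1 := by omega
    rw [h2, List.take_succ_cons]
    simp
  | case5 i hi =>
    intro sc
    rw [loopA, dif_neg hi]
    simp

-- ===== VERDICT (by name: the statement is the Claim_ definition above) =====
theorem convert_block_comments_spec : Claim_equal_convert_block_comments := by
  intro code _
  unfold Spec_convert_block_comments convert_block_comments convert_block_comments_alt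
  rw [join_empty_sep]
  exact congrArg String.mk (main_loop_eq code.toList 0 none)
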